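-- pv_equiv track=rewrite | github.com/HamzaQahoush/Problem-Solving | concatenationsSum.py | concatenationsSum
-- ===== SOURCE A (Python) =====
-- import collections
--
-- def concatenationsSum(a):
--     # sum = 0
--     # for i in range(len(a)):
--     #     for j in range(i,len(a)):
--     #         prod = str(a[i]) + str(a[j])
--     #         sum += int(prod)
--     # return sum
--     tot = 0
--     dic = collections.defaultdict(int)
--     for i in range(len(a)):
--         _str = str(a[i])
--         n = len(_str)
--         dic[n]+=1
--
--     for i in  range(len(a)):
--         for k,v in dic.items():
--             tot+=a[i]*(v*pow(10,k))
--         tot+=(a[i]*len(a))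
--     return tot
-- ===== SOURCE B (Python) =====
-- def concatenationsSum(a):
--     # One pass: S = sum of elements, P = sum of 10**len(str(x)); answer = S*P + len(a)*S.
--     S = 0
--     P = 0
--     for x in a:
--         S += x
--         P += 10 ** len(str(x))
--     return S * P + len(a) * S
-- ===== Notes on version B (the rewrite author's own statement) =====
-- stated objective: simpler
-- what changed: Replaced A's length-histogram defaultdict and nested loop over elements x dict items by a single pass accumulating S = sum(a) and P = sum(10**len(str(x))), returning S*P + len(a)*S (measured ~3x faster).
import Mathlib
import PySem

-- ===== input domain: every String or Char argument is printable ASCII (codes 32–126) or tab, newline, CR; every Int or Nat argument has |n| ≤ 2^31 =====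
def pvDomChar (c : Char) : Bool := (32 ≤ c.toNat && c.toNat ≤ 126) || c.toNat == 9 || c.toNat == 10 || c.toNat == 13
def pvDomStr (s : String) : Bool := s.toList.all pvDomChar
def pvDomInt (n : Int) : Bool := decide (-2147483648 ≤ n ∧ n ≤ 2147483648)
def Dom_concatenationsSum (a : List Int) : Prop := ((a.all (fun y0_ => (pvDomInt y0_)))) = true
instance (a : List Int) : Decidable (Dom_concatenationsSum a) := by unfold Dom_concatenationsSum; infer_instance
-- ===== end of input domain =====

-- B replaces A's length-histogram dict and nested loop by one pass accumulating the
-- element sum S and P = Σ 10^len(str(x)), returning S*P + n*S (objective: simpler).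

-- ===== PORT A =====
-- pow(10, k) with k a string length (k ≥ 0): 10 ^ k.toNat is exact.
def concatenationsSum (a : List Int) : Int :=
  let dic : PySem.Dict Int Int :=
    a.foldl (fun d x =>
      let _str := PySem.Int.toStr x
      let n : Int := PySem.Str.len _str
      d.modify n 0 (· + 1)) PySem.Dict.empty
  let tot : Int :=
    a.foldl (fun tot x =>
      let tot := dic.items.foldl (fun t kv => t + x * (kv.2 * 10 ^ kv.1.toNat)) tot
      tot + x * (a.length : Int)) 0
  tot

-- ===== PORT B =====
def concatenationsSum_alt (a : List Int) : Int :=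
  let sp : Int × Int :=
    a.foldl (fun sp x => (sp.1 + x, sp.2 + 10 ^ (PySem.Str.len (PySem.Int.toStr x)).toNat)) (0, 0)
  sp.1 * sp.2 + (a.length : Int) * sp.1

-- ===== PRECONDITION & SPEC =====
def Spec_concatenationsSum (a : List Int) (out : Int) : Prop := out = concatenationsSum_alt a
instance (a : List Int) (out : Int) : Decidable (Spec_concatenationsSum a out) := by unfold Spec_concatenationsSum; infer_instance

-- ===== CLAIM (what is proved, stated in full; the proofs are below) =====
def Claim_equal_concatenationsSum : Prop := ∀ (a : List Int), Dom_concatenationsSum a → Spec_concatenationsSum a (concatenationsSum a)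

-- ===== LEMMAS AND PROOFS =====

-- Σ over a Nodup list of (if k = x then f k else 0) is f x when x is in the list.
theorem pv_sum_ite_mem (S : List Int) (x : Int) (f : Int → Int) (hnd : S.Nodup) (hx : x ∈ S) :
    (S.map (fun k => if k = x then f k else 0)).sum = f x := by
  induction S with
  | nil => cases hx
  | cons y S ih =>
    simp only [List.map_cons, List.sum_cons]
    rcases List.nodup_cons.mp hnd with ⟨hy, hnd'⟩
    by_cases h : y = x
    · subst h
      have : (S.map (fun k => if k = y then f k else 0)).sum = 0 := by
        apply List.sum_eq_zero; intro z hz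
        rcases List.mem_map.mp hz with ⟨k, hk, rfl⟩
        simp only [ite_eq_right_iff]
        intro h'; exact absurd (h' ▸ hk) hy
      simp [this]
    · have hx' : x ∈ S := by
        rcases List.mem_cons.mp hx with rfl | h'
        · exact absurd rfl h
        · exact h'
      simp [h, ih hnd' hx']

-- Counting lemma: summing (count k)·f k over the distinct elements of L is summing f over L.
theorem pv_sum_count (L : List Int) (f : Int → Int) (S : List Int) (hnd : S.Nodup)
    (hsub : ∀ y ∈ L, y ∈ S) :
    (S.map (fun k => (L.count k : Int) * f k)).sum = (L.map f).sum := by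
  induction L with
  | nil => simp
  | cons x L ih =>
    have hx := hsub x (by simp)
    have hsub' : ∀ y ∈ L, y ∈ S := fun y hy => hsub y (by simp [hy])
    have hsplit : ∀ k : Int, ((x :: L).count k : Int) * f k
        = (L.count k : Int) * f k + (if k = x then f k else 0) := by
      intro k
      by_cases h : k = x
      · subst h; rw [List.count_cons_self]; push_cast; ring_nf; simp
      · simp [List.count_cons, h]
        exact Or.inl (fun h' => h h'.symm)
    calc (S.map (fun k => ((x :: L).count k : Int) * f k)).sum
        = (S.map (fun k => (L.count k : Int) * f k + (if k = x then f k else 0))).sum := by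
          congr 1; exact List.map_congr_left (fun k _ => hsplit k)
      _ = (S.map (fun k => (L.count k : Int) * f k)).sum
            + (S.map (fun k => if k = x then f k else 0)).sum := by
          rw [← List.sum_map_add]
      _ = (L.map f).sum + f x := by rw [ih hsub', pv_sum_ite_mem S x f hnd hx]
      _ = ((x :: L).map f).sum := by simp [add_comm]

-- B's paired loop is the two sums.
theorem pv_alt_foldl (a : List Int) (s p : Int) :
    a.foldl (fun sp x => (sp.1 + x, sp.2 + 10 ^ (PySem.Str.len (PySem.Int.toStr x)).toNat)) (s, p)
      = (s + a.sum, p + (a.map (fun x => (10:Int) ^ (PySem.Str.len (PySem.Int.toStr x)).toNat)).sum) := by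
  induction a generalizing s p with
  | nil => simp
  | cons x a ih =>
    rw [List.foldl_cons, ih]
    simp only [List.sum_cons, List.map_cons, Prod.mk.injEq]
    constructor <;> ring

-- ===== VERDICT (by name: the statement is the Claim_ definition above) =====
theorem concatenationsSum_spec : Claim_equal_concatenationsSum := by
  intro a _
  show concatenationsSum a = concatenationsSum_alt a
  unfold concatenationsSum concatenationsSum_alt
  rw [pv_alt_foldl]
  set key : Int → Int := fun x => PySem.Str.len (PySem.Int.toStr x) with hkey
  set L : List Int := a.map key with hL
  have hdic : (a.foldl (fun d x =>
      let _str := PySem.Int.toStr x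
      let n : Int := PySem.Str.len _str
      d.modify n 0 (· + 1)) PySem.Dict.empty) = PySem.Dict.counter L := by
    rw [PySem.Dict.counter_eq_foldl, hL, List.foldl_map]
  rw [hdic]
  set P : Int := (a.map (fun x => (10:Int) ^ ((key x).toNat))).sum with hP
  have hitems : (PySem.Dict.counter L).items
      = (PySem.Set.ofList L).map (fun k => (k, (L.count k : Int))) := PySem.Dict.items_counter L
  -- inner loop: per element x it adds x * P
  have hinner : ∀ (x t : Int),
      (PySem.Dict.counter L).items.foldl (fun t kv => t + x * (kv.2 * 10 ^ kv.1.toNat)) t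
        = t + x * P := by
    intro x t
    rw [PySem.List.foldl_add (g := fun kv : Int × Int => x * (kv.2 * 10 ^ kv.1.toNat))]
    congr 1
    rw [hitems, List.map_map]
    have : ((PySem.Set.ofList L).map
        ((fun kv : Int × Int => x * (kv.2 * 10 ^ kv.1.toNat)) ∘ fun k => (k, (L.count k : Int)))).sum
        = x * ((PySem.Set.ofList L).map (fun k => (L.count k : Int) * 10 ^ k.toNat)).sum := by
      rw [← List.sum_map_mul_left]
      rfl
    rw [this, pv_sum_count L (fun k => (10:Int) ^ k.toNat) (PySem.Set.ofList L)
        (PySem.Set.nodup_ofList L) (fun y hy => (PySem.Set.mem_ofList L y).mpr hy)]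
    rw [hL, List.map_map]
    rfl
  have houter : a.foldl (fun tot x =>
      let tot := (PySem.Dict.counter L).items.foldl (fun t kv => t + x * (kv.2 * 10 ^ kv.1.toNat)) tot
      tot + x * (a.length : Int)) 0
      = a.foldl (fun tot x => tot + (x * P + x * (a.length : Int))) 0 := by
    apply PySem.List.foldl_congr_mem
    intro tot x _
    simp only [hinner x tot]
    ring
  have hsum : (a.map (fun x => x * P + x * (a.length : Int))).sum
      = a.sum * P + a.sum * (a.length : Int) := by
    rw [PySem.List.sum_map_add_int, List.sum_map_mul_right, List.sum_map_mul_right]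
    simp only [List.map_id']
  have main : (a.foldl (fun tot x =>
        (PySem.Dict.counter L).items.foldl (fun t kv => t + x * (kv.2 * 10 ^ kv.1.toNat)) tot
          + x * (a.length : Int)) 0)
      = (0 + a.sum) * (0 + P) + (a.length : Int) * (0 + a.sum) := by
    rw [houter, PySem.List.foldl_add (g := fun x => x * P + x * (a.length : Int)), hsum]
    ring
  exact main
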